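-- pv_equiv track=rewrite | github.com/slonoten/back_to_school | leetcode/python/regexp_match.py | squeeze_pattern
-- ===== SOURCE A (Python) =====
-- from typing import Tuple
--
-- def squeeze_pattern(p: str) -> Tuple[Tuple[str, bool]]:
--     pattern_full = [(f, s == '*') for f, s in  [*zip(p, p[1:] + " ")] if f != '*']
--     pattern = []
--     prev_any = None
--     for ch, is_any in pattern_full:
--         if is_any and prev_any in (ch, "*"):
--             continue
--         prev_any = ch if is_any else None
--         pattern.append((ch, is_any))
--     return tuple(pattern)
-- ===== SOURCE B (Python) =====
-- def squeeze_pattern(p: str):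
--     # Scan right-to-left: a 'starred' flag replaces the successor-pairing,
--     # the result is built back-to-front and deduped against its last built
--     # token, then reversed once.
--     rev = []
--     starred = False
--     for ch in reversed(p):
--         if ch == '*':
--             starred = True
--             continue
--         tok = (ch, starred)
--         starred = False
--         if not (tok[1] and rev and rev[-1] == tok):
--             rev.append(tok)
--     rev.reverse()
--     return tuple(rev)
-- ===== Notes on version B (the rewrite author's own statement) =====
-- stated objective: alternative
-- what changed: B scans the string right-to-left carrying a star-seen flag instead of A's zip-pairing of each char with its successor, builds the result back-to-front deduping a starred token against the last built one, and reverses once; no intermediate pattern_full list and no prev_any state.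
import Mathlib
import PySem

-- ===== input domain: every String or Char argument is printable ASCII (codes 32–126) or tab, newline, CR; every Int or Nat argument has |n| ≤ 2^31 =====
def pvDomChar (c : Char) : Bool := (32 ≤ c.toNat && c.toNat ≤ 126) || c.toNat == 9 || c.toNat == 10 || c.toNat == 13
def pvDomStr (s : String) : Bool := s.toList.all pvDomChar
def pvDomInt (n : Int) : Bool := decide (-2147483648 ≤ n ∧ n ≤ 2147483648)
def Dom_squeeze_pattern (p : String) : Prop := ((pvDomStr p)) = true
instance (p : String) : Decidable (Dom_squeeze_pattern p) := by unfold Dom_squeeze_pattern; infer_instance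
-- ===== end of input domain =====

-- B scans the string right-to-left carrying a star-seen flag instead of pairing each char with its
-- successor, builds the result back-to-front deduping against the last built token, then reverses
-- once (objective: alternative).


-- ===== PORT A =====
def squeeze_pattern (p : String) : List (String × Bool) :=
  let cs := p.toList
  -- pattern_full = [(f, s == '*') for f, s in [*zip(p, p[1:] + " ")] if f != '*']
  let pattern_full : List (String × Bool) :=
    ((cs.zip ((cs.drop 1) ++ [' '])).filter (fun fs => fs.1 != '*')).map
      (fun fs => (String.ofList [fs.1], fs.2 == '*'))
  -- loop over pattern_full with accumulator (pattern, prev_any)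
  let res := pattern_full.foldl
    (fun (st : List (String × Bool) × Option String) cb =>
      if cb.2 && (st.2 == some cb.1 || st.2 == some "*") then st
      else (st.1 ++ [cb], if cb.2 then some cb.1 else none)) ([], none)
  res.1

-- ===== PORT B =====
-- Source B: for ch in reversed(p) with state (starred, rev); a foldl over the reversed char list
def squeeze_pattern_alt (p : String) : List (String × Bool) :=
  let st := p.toList.reverse.foldl
    (fun (acc : Bool × List (String × Bool)) ch =>
      if ch == '*' then (true, acc.2)
      else
        let tok : String × Bool := (String.ofList [ch], acc.1)
        (false, if acc.1 && (acc.2.getLast? == some tok) then acc.2 else acc.2 ++ [tok]))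
    (false, [])
  st.2.reverse

-- ===== PRECONDITION & SPEC =====
def Spec_squeeze_pattern (p : String) (out : List (String × Bool)) : Prop := out = squeeze_pattern_alt p
instance (p : String) (out : List (String × Bool)) : Decidable (Spec_squeeze_pattern p out) := by unfold Spec_squeeze_pattern; infer_instance

-- ===== CLAIM (what is proved, stated in full; the proofs are below) =====
def Claim_equal_squeeze_pattern : Prop := ∀ (p : String), Dom_squeeze_pattern p → Spec_squeeze_pattern p (squeeze_pattern p)

-- ===== LEMMAS AND PROOFS =====

-- forward reference recursion: both ports are proved equal to this token-wise forward pass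
def pvLoopF : List Char → Option String → List (String × Bool)
  | [], _ => []
  | ch :: rest, prev =>
    if ch == '*' then pvLoopF rest prev
    else
      let isAny := rest.head? == some '*'
      let s := String.ofList [ch]
      if isAny && prev == some s then pvLoopF rest prev
      else (s, isAny) :: pvLoopF rest (if isAny then some s else none)

def pvStepA (st : List (String × Bool) × Option String) (cb : String × Bool) :
    List (String × Bool) × Option String :=
  if cb.2 && (st.2 == some cb.1 || st.2 == some "*") then st
  else (st.1 ++ [cb], if cb.2 then some cb.1 else none)

def pvFullA (cs : List Char) : List (String × Bool) :=
  ((cs.zip ((cs.drop 1) ++ [' '])).filter (fun fs => fs.1 != '*')).map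
    (fun fs => (String.ofList [fs.1], fs.2 == '*'))

def pvStepB (acc : Bool × List (String × Bool)) (ch : Char) : Bool × List (String × Bool) :=
  if ch == '*' then (true, acc.2)
  else
    let tok : String × Bool := (String.ofList [ch], acc.1)
    (false, if acc.1 && (acc.2.getLast? == some tok) then acc.2 else acc.2 ++ [tok])

theorem pvFullA_cons (c : Char) (rest : List Char) :
    pvFullA (c :: rest) =
      (if c = '*' then [] else [(String.ofList [c], rest.head?.getD ' ' == '*')]) ++ pvFullA rest := by
  cases rest with
  | nil => by_cases h : c = '*' <;> simp [pvFullA, h]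
  | cons r rs => by_cases h : c = '*' <;> simp [pvFullA, h]

theorem pvLoopA_eq : ∀ (cs : List Char) (acc : List (String × Bool)) (prev : Option String),
    prev ≠ some "*" →
    ((pvFullA cs).foldl pvStepA (acc, prev)).1 = acc ++ pvLoopF cs prev := by
  intro cs
  induction cs with
  | nil => intro acc prev _; simp [pvFullA, pvLoopF]
  | cons c rest ih =>
    intro acc prev hprev
    rw [pvFullA_cons, List.foldl_append]
    by_cases hc : c = '*'
    · simp only [hc, ite_true]
      simp [pvLoopF, ih acc prev hprev]
    · simp only [if_neg hc, List.foldl_cons, List.foldl_nil]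
      have hne : (String.ofList [c]) ≠ "*" := by
        intro h
        have h2 : [c] = "*".toList := by
          rw [← String.toList_ofList (l := [c]), h]
        simp at h2
        exact hc h2
      have hpf : (prev == some "*") = false := by simp [hprev]
      cases hA : (rest.head? == some '*') with
      | false =>
        have hhead : (rest.head?.getD ' ' == '*') = false := by
          cases rest with
          | nil => simp
          | cons r rs => simpa using hA
        have hstep : pvStepA (acc, prev) (String.ofList [c], rest.head?.getD ' ' == '*') =
            (acc ++ [(String.ofList [c], false)], none) := by
          simp [pvStepA, hhead]
        have hA' : rest.head? ≠ some '*' := by simpa using hA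
        rw [hstep, ih (acc ++ [(String.ofList [c], false)]) none (by simp)]
        simp only [pvLoopF, beq_iff_eq, if_neg hc]
        simp [hA, hA', List.append_assoc]
      | true =>
        have hhead : (rest.head?.getD ' ' == '*') = true := by
          cases rest with
          | nil => simp at hA
          | cons r rs => simpa using hA
        by_cases hp : prev = some (String.ofList [c])
        · have hstep : pvStepA (acc, prev) (String.ofList [c], rest.head?.getD ' ' == '*') =
              (acc, prev) := by
            simp [pvStepA, hhead, hp]
          have hA' : rest.head? = some '*' := by simpa using hA
          rw [hstep, ih acc prev hprev]
          simp only [pvLoopF, beq_iff_eq, if_neg hc]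
          simp [hA', hp]
        · have hstep : pvStepA (acc, prev) (String.ofList [c], rest.head?.getD ' ' == '*') =
              (acc ++ [(String.ofList [c], true)], some (String.ofList [c])) := by
            have hpne : (prev == some (String.ofList [c])) = false := by simp [hp]
            simp [pvStepA, hhead, hpne, hpf]
          have hA' : rest.head? = some '*' := by simpa using hA
          rw [hstep, ih (acc ++ [(String.ofList [c], true)]) (some (String.ofList [c])) (by simp [hne])]
          simp only [pvLoopF, beq_iff_eq, if_neg hc]
          simp [hA', hp, List.append_assoc]

-- carrying prev = some s only possibly skips one leading token (s, true)
theorem pvLoopF_some : ∀ (cs : List Char) (s : String),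
    pvLoopF cs (some s) =
      (if (pvLoopF cs none).head? == some (s, true) then (pvLoopF cs none).tail
       else pvLoopF cs none) := by
  intro cs
  induction cs with
  | nil => intro s; simp [pvLoopF]
  | cons c rest ih =>
    intro s
    by_cases hc : c = '*'
    · simp only [pvLoopF, hc, beq_self_eq_true, ite_true]
      exact ih s
    · have hc' : (c == '*') = false := by simp [hc]
      cases hA : (rest.head? == some '*') with
      | false =>
        simp [pvLoopF, hc', hA]
      | true =>
        by_cases hs : s = String.ofList [c]
        · simp [pvLoopF, hc', hA, hs]
        · have hsb : (some s == some (String.ofList [c])) = false := by simp [hs]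
          simp [pvLoopF, hc', hA, hsb, Ne.symm hs]

-- B's reversed fold computes (flag = leading star, reverse of the forward pass)
theorem pvLoopB_eq : ∀ (cs : List Char),
    cs.reverse.foldl pvStepB (false, []) =
      ((cs.head? == some '*'), (pvLoopF cs none).reverse) := by
  intro cs
  induction cs with
  | nil => simp [pvLoopF]
  | cons c rest ih =>
    rw [List.reverse_cons, List.foldl_append, List.foldl_cons, List.foldl_nil, ih]
    by_cases hc : c = '*'
    · simp [pvStepB, hc, pvLoopF]
    · have hc' : (c == '*') = false := by simp [hc]
      cases hA : (rest.head? == some '*') with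
      | false =>
        simp [pvStepB, hc', hA, pvLoopF]
      | true =>
        have hL := pvLoopF_some rest (String.ofList [c])
        cases hE : pvLoopF rest none with
        | nil =>
          rw [hE] at hL
          simp at hL
          simp [pvStepB, pvLoopF, hc', hA, hL]
        | cons x xs =>
          rw [hE] at hL
          by_cases hx : x = (String.ofList [c], true)
          · subst hx
            simp only [List.head?_cons, beq_self_eq_true, ite_true, List.tail_cons] at hL
            simp [pvStepB, pvLoopF, hc', hA, hL]
          · have hx' : ((x :: xs).head? == some (String.ofList [c], true)) = false := by
              simp [hx]
            rw [hx', if_neg (by simp)] at hL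
            have hxb : (x == (String.ofList [c], true)) = false := by simp [hx]
            simp [pvStepB, pvLoopF, hc', hA, hL, hxb]

-- ===== VERDICT (by name: the statement is the Claim_ definition above) =====
theorem squeeze_pattern_spec : Claim_equal_squeeze_pattern := by
  intro p _
  unfold Spec_squeeze_pattern
  show ((pvFullA p.toList).foldl pvStepA ([], none)).1 =
    ((p.toList.reverse.foldl pvStepB (false, [])).2).reverse
  rw [pvLoopA_eq p.toList [] none (by simp), pvLoopB_eq p.toList]
  simp
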